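-- pv_equiv track=rewrite | github.com/antshiv/C-Kernel-Engine | scripts/build_ir_v2.py | pick_weights_file
-- ===== SOURCE A (Python) =====
-- from typing import Dict, Iterable, List, Optional, Tuple
--
-- def pick_weights_file(siblings: List[str]) -> Optional[str]:
--     if not siblings:
--         return None
--     index_files = [s for s in siblings if s.endswith(".safetensors.index.json")]
--     if "model.safetensors.index.json" in index_files:
--         return "model.safetensors.index.json"
--     if index_files:
--         return sorted(index_files, key=lambda s: (len(s), s))[0]
--
--     tensor_files = [s for s in siblings if s.endswith(".safetensors")]
--     if "model.safetensors" in tensor_files: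
--         return "model.safetensors"
--     if tensor_files:
--         return sorted(tensor_files, key=lambda s: (len(s), s))[0]
--
--     gguf_files = [s for s in siblings if s.endswith(".gguf")]
--     if gguf_files:
--         preferred = [s for s in gguf_files if "q4_k_m" in s.lower()]
--         if preferred:
--             return sorted(preferred, key=lambda s: (len(s), s))[0]
--         return sorted(gguf_files, key=lambda s: (len(s), s))[0]
--     return None
-- ===== SOURCE B (Python) =====
-- def _key(s):
--     """Composite sort key: (tier, non-preferred flag, len, name), or None if not a weights file."""
--     if s.endswith(".safetensors.index.json"):
--         return (0, 0 if s == "model.safetensors.index.json" else 1, len(s), s)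
--     if s.endswith(".safetensors"):
--         return (1, 0 if s == "model.safetensors" else 1, len(s), s)
--     if s.endswith(".gguf"):
--         return (2, 0 if "q4_k_m" in s.lower() else 1, len(s), s)
--     return None
--
--
-- def pick_weights_file(siblings):
--     best = None
--     for s in siblings:
--         k = _key(s)
--         if k is not None and (best is None or k < best):
--             best = k
--     return None if best is None else best[3]
-- ===== Notes on version B (the rewrite author's own statement) =====
-- stated objective: alternative
-- what changed: A's three staged suffix-filter/membership-check/sort-and-take-head tiers with early returns are replaced by a single pass that assigns each sibling a composite key (tier, non-preferred flag, length, name) and keeps the key-minimal candidate in one accumulator.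
import Mathlib
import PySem

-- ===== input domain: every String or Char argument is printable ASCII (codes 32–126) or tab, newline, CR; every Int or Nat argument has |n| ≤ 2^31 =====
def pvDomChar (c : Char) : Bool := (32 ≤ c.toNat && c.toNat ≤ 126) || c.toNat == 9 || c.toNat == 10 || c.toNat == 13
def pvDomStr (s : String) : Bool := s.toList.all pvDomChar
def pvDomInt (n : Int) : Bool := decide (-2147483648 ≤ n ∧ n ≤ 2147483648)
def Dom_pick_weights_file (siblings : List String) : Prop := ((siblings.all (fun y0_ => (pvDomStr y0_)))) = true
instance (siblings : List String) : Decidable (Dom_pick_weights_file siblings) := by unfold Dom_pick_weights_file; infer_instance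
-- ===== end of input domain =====

-- B replaces A's three staged filter/sort/early-return tiers by one pass computing, per file, a
-- composite key (tier, non-preferred flag, length, name) and returning the key-minimal file
-- (objective: alternative decomposition, same observable result).

-- ===== PORT A =====
def pick_weights_file (siblings : List String) : Option String :=
  if siblings = [] then none
  else
    let index_files := siblings.filter (fun s => PySem.Str.endswith s ".safetensors.index.json")
    if index_files.contains "model.safetensors.index.json" then some "model.safetensors.index.json"
    else if index_files ≠ [] then
      PySem.List.pyGet? (PySem.List.sorted2 index_files (fun s => PySem.Str.len s) (fun s => s)) 0
    else
      let tensor_files := siblings.filter (fun s => PySem.Str.endswith s ".safetensors")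
      if tensor_files.contains "model.safetensors" then some "model.safetensors"
      else if tensor_files ≠ [] then
        PySem.List.pyGet? (PySem.List.sorted2 tensor_files (fun s => PySem.Str.len s) (fun s => s)) 0
      else
        let gguf_files := siblings.filter (fun s => PySem.Str.endswith s ".gguf")
        if gguf_files ≠ [] then
          let preferred := gguf_files.filter (fun s => PySem.Str.isIn "q4_k_m" (PySem.Str.lower s))
          if preferred ≠ [] then
            PySem.List.pyGet? (PySem.List.sorted2 preferred (fun s => PySem.Str.len s) (fun s => s)) 0
          else
            PySem.List.pyGet? (PySem.List.sorted2 gguf_files (fun s => PySem.Str.len s) (fun s => s)) 0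
        else none

-- ===== PORT B =====
-- _key(s) of Source B: composite key (tier, non-preferred flag, len, name) or None
def pvKey? (s : String) : Option (Int × Int × Int × String) :=
  if PySem.Str.endswith s ".safetensors.index.json" then
    some (0, if s = "model.safetensors.index.json" then 0 else 1, PySem.Str.len s, s)
  else if PySem.Str.endswith s ".safetensors" then
    some (1, if s = "model.safetensors" then 0 else 1, PySem.Str.len s, s)
  else if PySem.Str.endswith s ".gguf" then
    some (2, if PySem.Str.isIn "q4_k_m" (PySem.Str.lower s) then 0 else 1, PySem.Str.len s, s)
  else none

-- Python's tuple '<' on (int, int, int, str): lexicographic, exact here (String '<' is code-point order)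
def pvKeyLt (a b : Int × Int × Int × String) : Bool :=
  if a.1 < b.1 then true else if b.1 < a.1 then false
  else if a.2.1 < b.2.1 then true else if b.2.1 < a.2.1 then false
  else if a.2.2.1 < b.2.2.1 then true else if b.2.2.1 < a.2.2.1 then false
  else a.2.2.2 < b.2.2.2

def pick_weights_file_alt (siblings : List String) : Option String :=
  (siblings.foldl
      (fun best s =>
        match pvKey? s with
        | none => best
        | some k =>
          match best with
          | none => some k
          | some b => if pvKeyLt k b then some k else best)
      none).map (fun k => k.2.2.2)

-- ===== PRECONDITION & SPEC =====
def Spec_pick_weights_file (siblings : List String) (out : Option String) : Prop := out = pick_weights_file_alt siblings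
instance (siblings : List String) (out : Option String) : Decidable (Spec_pick_weights_file siblings out) := by unfold Spec_pick_weights_file; infer_instance

-- ===== CLAIM (what is proved, stated in full; the proofs are below) =====
def Claim_equal_pick_weights_file : Prop := ∀ (siblings : List String), Dom_pick_weights_file siblings → Spec_pick_weights_file siblings (pick_weights_file siblings)

-- ===== LEMMAS AND PROOFS =====

-- generic "keep the strictly smaller" accumulator step
def pvPick {α : Type} (lt : α → α → Bool) (acc : Option α) (x : α) : Option α :=
  match acc with
  | none => some x
  | some m => if lt x m then some x else some m

theorem pvPick_fold_eq_none {α : Type} (lt : α → α → Bool) :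
    ∀ (xs : List α) (acc : Option α), xs.foldl (pvPick lt) acc = none ↔ acc = none ∧ xs = [] := by
  intro xs
  induction xs with
  | nil => intro acc; simp
  | cons x t ih =>
    intro acc
    simp only [List.foldl_cons, ih]
    constructor
    · rintro ⟨h, -⟩
      exfalso
      cases acc with
      | none => simp [pvPick] at h
      | some m => simp [pvPick] at h; split at h <;> simp_all
    · rintro ⟨-, h⟩; simp at h

theorem pvPick_fold_min_gen {α : Type} (lt : α → α → Bool)
    (htrans : ∀ a b c, lt a b = true → lt b c = true → lt a c = true)
    (hirr : ∀ a, lt a a = false)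
    (hconn : ∀ a b, lt a b = false → lt b a = true ∨ a = b) :
    ∀ (xs : List α) (m u : α), xs.foldl (pvPick lt) (some m) = some u →
      (u = m ∨ u ∈ xs) ∧ lt m u = false ∧ ∀ y ∈ xs, lt y u = false := by
  intro xs
  induction xs with
  | nil =>
    intro m u h
    simp only [List.foldl_nil, Option.some.injEq] at h
    subst h
    exact ⟨Or.inl rfl, hirr _, by simp⟩
  | cons x t ih =>
    intro m u h
    simp only [List.foldl_cons, pvPick] at h
    by_cases hxm : lt x m = true
    · rw [if_pos hxm] at h
      obtain ⟨hmem, hxu, hall⟩ := ih x u h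
      refine ⟨?_, ?_, ?_⟩
      · rcases hmem with h1 | h1
        · exact Or.inr (by simp [h1])
        · exact Or.inr (List.mem_cons_of_mem _ h1)
      · by_contra hmu
        have hmu' : lt m u = true := by simpa using hmu
        have : lt x u = true := htrans _ _ _ hxm hmu'
        simp [this] at hxu
      · intro y hy
        rcases List.mem_cons.1 hy with rfl | hy'
        · exact hxu
        · exact hall y hy'
    · have hxm' : lt x m = false := by simpa using hxm
      rw [if_neg hxm] at h
      obtain ⟨hmem, hmu, hall⟩ := ih m u h
      refine ⟨?_, hmu, ?_⟩
      · rcases hmem with h1 | h1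
        · exact Or.inl h1
        · exact Or.inr (List.mem_cons_of_mem _ h1)
      · intro y hy
        rcases List.mem_cons.1 hy with h5 | hy'
        · rw [h5]
          by_contra hxu
          have hxu' : lt x u = true := by simpa using hxu
          rcases hconn x m hxm' with hmx | heq
          · have : lt m u = true := htrans _ _ _ hmx hxu'
            simp [this] at hmu
          · rw [heq] at hxu'
            simp [hxu'] at hmu
        · exact hall y hy'

theorem pvPick_fold_min {α : Type} (lt : α → α → Bool)
    (htrans : ∀ a b c, lt a b = true → lt b c = true → lt a c = true)
    (hirr : ∀ a, lt a a = false)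
    (hconn : ∀ a b, lt a b = false → lt b a = true ∨ a = b) :
    ∀ (xs : List α) (u : α), xs.foldl (pvPick lt) none = some u →
      u ∈ xs ∧ ∀ y ∈ xs, lt y u = false := by
  intro xs u h
  cases xs with
  | nil => simp at h
  | cons x t =>
    simp only [List.foldl_cons, pvPick] at h
    obtain ⟨hmem, hxu, hall⟩ := pvPick_fold_min_gen lt htrans hirr hconn t x u h
    refine ⟨?_, ?_⟩
    · rcases hmem with rfl | h1
      · simp
      · exact List.mem_cons_of_mem _ h1
    · intro y hy
      rcases List.mem_cons.1 hy with rfl | hy'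
      · exact hxu
      · exact hall y hy'

theorem pvPick_fold_eq_of_min {α : Type} (lt : α → α → Bool)
    (htrans : ∀ a b c, lt a b = true → lt b c = true → lt a c = true)
    (hirr : ∀ a, lt a a = false)
    (hconn : ∀ a b, lt a b = false → lt b a = true ∨ a = b)
    (xs : List α) (k : α) (hk : k ∈ xs) (hmin : ∀ y ∈ xs, lt y k = false) :
    xs.foldl (pvPick lt) none = some k := by
  cases hu : xs.foldl (pvPick lt) none with
  | none =>
    rw [pvPick_fold_eq_none] at hu
    rcases hu with ⟨-, rfl⟩; simp at hk
  | some u =>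
    obtain ⟨humem, humin⟩ := pvPick_fold_min lt htrans hirr hconn xs u hu
    have h1 := humin k hk
    have h2 := hmin u humem
    rcases hconn k u h1 with h3 | rfl
    · simp [h3] at h2
    · rfl

theorem pvInsertBy_head {α : Type} (before : α → α → Bool) (x : α) (l : List α) :
    (PySem.List.insertBy before x l).head? =
      some (match l.head? with | none => x | some y => if before x y then x else y) := by
  cases l with
  | nil => simp [PySem.List.insertBy]
  | cons y ys => by_cases hb : before x y = true <;> simp [PySem.List.insertBy, hb]

theorem pvFoldl_insertBy_head {α : Type} (before : α → α → Bool) :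
    ∀ (xs : List α) (acc : List α),
      (xs.foldl (fun a x => PySem.List.insertBy before x a) acc).head? =
        xs.foldl (fun m x => pvPick before m x) acc.head? := by
  intro xs
  induction xs with
  | nil => intro acc; simp
  | cons x t ih =>
    intro acc
    simp only [List.foldl_cons, ih, pvInsertBy_head]
    congr 1
    cases acc with
    | nil => simp [pvPick]
    | cons a as => by_cases hb : before x a = true <;> simp [pvPick, hb]

theorem pvPyGet0_eq_head {α : Type} (xs : List α) : PySem.List.pyGet? xs 0 = xs.head? := by
  cases xs <;> simp [PySem.List.pyGet?, PySem.List.pyIdx?]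

theorem pvSorted2_pyGet0 {α : Type} (xs : List α) (k1 : α → Int) (k2 : α → String) :
    PySem.List.pyGet? (PySem.List.sorted2 xs k1 k2) 0 =
      xs.foldl (pvPick (fun a b => decide (k1 a < k1 b) || (!decide (k1 b < k1 a) && decide (k2 a < k2 b)))) none := by
  rw [pvPyGet0_eq_head]
  show (xs.foldl (fun a x => PySem.List.insertBy _ x a) []).head? = _
  rw [pvFoldl_insertBy_head]
  rfl

theorem pvAlt_fold (l : List String) :
    ∀ acc, l.foldl
      (fun best s =>
        match pvKey? s with
        | none => best
        | some k =>
          match best with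
          | none => some k
          | some b => if pvKeyLt k b then some k else best)
      acc = (l.filterMap pvKey?).foldl (pvPick pvKeyLt) acc := by
  induction l with
  | nil => intro acc; simp
  | cons x t ih =>
    intro acc
    cases hk : pvKey? x with
    | none => simp [hk, ih]
    | some k =>
      have hfm : List.filterMap pvKey? (x :: t) = k :: List.filterMap pvKey? t := by
        simp [hk]
      rw [hfm]
      simp only [List.foldl_cons, hk]
      rw [ih]
      congr 1
      cases acc <;> simp [pvPick]

theorem pvAlt_eq_keys_fold (l : List String) :
    pick_weights_file_alt l = ((l.filterMap pvKey?).foldl (pvPick pvKeyLt) none).map (fun k => k.2.2.2) := by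
  unfold pick_weights_file_alt
  rw [pvAlt_fold]

theorem pvKeyLt_iff (a b : Int × Int × Int × String) :
    pvKeyLt a b = true ↔
      (a.1 < b.1 ∨ (a.1 = b.1 ∧ (a.2.1 < b.2.1 ∨ (a.2.1 = b.2.1 ∧
        (a.2.2.1 < b.2.2.1 ∨ (a.2.2.1 = b.2.2.1 ∧ a.2.2.2 < b.2.2.2)))))) := by
  obtain ⟨a1, a2, a3, a4⟩ := a
  obtain ⟨b1, b2, b3, b4⟩ := b
  simp only [pvKeyLt]
  split_ifs with h1 h2 h3 h4 h5 h6 <;> simp <;> try omega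
  constructor
  · intro h
    exact Or.inr ⟨by omega, Or.inr ⟨by omega, Or.inr ⟨by omega, h⟩⟩⟩
  · rintro (h | ⟨-, h | ⟨-, h | ⟨-, h⟩⟩⟩)
    · omega
    · omega
    · omega
    · exact h

theorem pvKeyLt_irr (a : Int × Int × Int × String) : pvKeyLt a a = false := by
  obtain ⟨a1, a2, a3, a4⟩ := a
  simp [pvKeyLt]

theorem pvKeyLt_trans (a b c : Int × Int × Int × String) :
    pvKeyLt a b = true → pvKeyLt b c = true → pvKeyLt a c = true := by
  rw [pvKeyLt_iff, pvKeyLt_iff, pvKeyLt_iff]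
  rintro (h | ⟨e1, h | ⟨e2, h | ⟨e3, h⟩⟩⟩) (g | ⟨f1, g | ⟨f2, g | ⟨f3, g⟩⟩⟩) <;>
    first
    | (left; omega)
    | (right; exact ⟨by omega, Or.inl (by omega)⟩)
    | (right; exact ⟨by omega, Or.inr ⟨by omega, Or.inl (by omega)⟩⟩)
    | (right; exact ⟨by omega, Or.inr ⟨by omega, Or.inr ⟨by omega, lt_trans h g⟩⟩⟩)

theorem pvKeyLt_conn (a b : Int × Int × Int × String) :
    pvKeyLt a b = false → pvKeyLt b a = true ∨ a = b := by
  intro h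
  obtain ⟨a1, a2, a3, a4⟩ := a
  obtain ⟨b1, b2, b3, b4⟩ := b
  have hR : ¬ (a1 < b1 ∨ (a1 = b1 ∧ (a2 < b2 ∨ (a2 = b2 ∧ (a3 < b3 ∨ (a3 = b3 ∧ a4 < b4)))))) := by
    intro hr
    have hc := (pvKeyLt_iff (a1, a2, a3, a4) (b1, b2, b3, b4)).2 hr
    rw [h] at hc
    cases hc
  rcases lt_trichotomy a1 b1 with c1 | c1 | c1
  · exact absurd (Or.inl c1) hR
  · rcases lt_trichotomy a2 b2 with c2 | c2 | c2
    · exact absurd (Or.inr ⟨c1, Or.inl c2⟩) hR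
    · rcases lt_trichotomy a3 b3 with c3 | c3 | c3
      · exact absurd (Or.inr ⟨c1, Or.inr ⟨c2, Or.inl c3⟩⟩) hR
      · rcases lt_trichotomy a4 b4 with c4 | c4 | c4
        · exact absurd (Or.inr ⟨c1, Or.inr ⟨c2, Or.inr ⟨c3, c4⟩⟩⟩) hR
        · right; rw [c1, c2, c3, c4]
        · left; rw [pvKeyLt_iff]; exact Or.inr ⟨c1.symm, Or.inr ⟨c2.symm, Or.inr ⟨c3.symm, c4⟩⟩⟩
      · left; rw [pvKeyLt_iff]; exact Or.inr ⟨c1.symm, Or.inr ⟨c2.symm, Or.inl c3⟩⟩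
    · left; rw [pvKeyLt_iff]; exact Or.inr ⟨c1.symm, Or.inl c2⟩
  · left; rw [pvKeyLt_iff]; exact Or.inl c1

theorem pvKeyLt_eq_false (a b : Int × Int × Int × String)
    (h : ¬ (a.1 < b.1 ∨ (a.1 = b.1 ∧ (a.2.1 < b.2.1 ∨ (a.2.1 = b.2.1 ∧
      (a.2.2.1 < b.2.2.1 ∨ (a.2.2.1 = b.2.2.1 ∧ a.2.2.2 < b.2.2.2))))))) :
    pvKeyLt a b = false := by
  cases hb : pvKeyLt a b
  · rfl
  · exact absurd ((pvKeyLt_iff _ _).1 hb) h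

-- the comparison sorted2 uses with key (len s, s)
def pvLt2 (a b : String) : Bool :=
  decide (PySem.Str.len a < PySem.Str.len b) ||
    (!decide (PySem.Str.len b < PySem.Str.len a) && decide (a < b))

theorem pvLt2_iff (a b : String) :
    pvLt2 a b = true ↔ (PySem.Str.len a < PySem.Str.len b ∨ (PySem.Str.len a = PySem.Str.len b ∧ a < b)) := by
  unfold pvLt2
  rw [Bool.or_eq_true, Bool.and_eq_true, Bool.not_eq_true', decide_eq_true_eq, decide_eq_true_eq,
    decide_eq_false_iff_not]
  constructor
  · rintro (h | ⟨h2, h3⟩)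
    · exact Or.inl h
    · by_cases h1 : PySem.Str.len a < PySem.Str.len b
      · exact Or.inl h1
      · exact Or.inr ⟨by omega, h3⟩
  · rintro (h | ⟨h1, h2⟩)
    · exact Or.inl h
    · exact Or.inr ⟨by omega, h2⟩

theorem pvLt2_trans (a b c : String) : pvLt2 a b = true → pvLt2 b c = true → pvLt2 a c = true := by
  rw [pvLt2_iff, pvLt2_iff, pvLt2_iff]
  rintro (h | ⟨e, h⟩) (g | ⟨f, g⟩)
  · left; omega
  · left; omega
  · left; omega
  · right; exact ⟨by omega, lt_trans h g⟩

theorem pvLt2_irr (a : String) : pvLt2 a a = false := by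
  simp [pvLt2]

theorem pvLt2_conn (a b : String) : pvLt2 a b = false → pvLt2 b a = true ∨ a = b := by
  intro h
  have hR : ¬ (PySem.Str.len a < PySem.Str.len b ∨ (PySem.Str.len a = PySem.Str.len b ∧ a < b)) := by
    intro hr
    have hc := (pvLt2_iff a b).2 hr
    rw [h] at hc
    cases hc
  rcases lt_trichotomy (PySem.Str.len a) (PySem.Str.len b) with c1 | c1 | c1
  · exact absurd (Or.inl c1) hR
  · rcases lt_trichotomy a b with c2 | c2 | c2
    · exact absurd (Or.inr ⟨c1, c2⟩) hR
    · right; exact c2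
    · left; rw [pvLt2_iff]; exact Or.inr ⟨c1.symm, c2⟩
  · left; rw [pvLt2_iff]; exact Or.inl c1

theorem pvKeyLt_same (t p : Int) (s a : String) :
    pvKeyLt (t, p, PySem.Str.len s, s) (t, p, PySem.Str.len a, a) = pvLt2 s a := by
  cases h : pvLt2 s a
  · apply pvKeyLt_eq_false
    rintro (c | ⟨-, c | ⟨-, c⟩⟩)
    · exact absurd c (lt_irrefl t)
    · exact absurd c (lt_irrefl p)
    · have : pvLt2 s a = true := (pvLt2_iff s a).2 c
      rw [h] at this
      cases this
  · rw [pvKeyLt_iff]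
    exact Or.inr ⟨rfl, Or.inr ⟨rfl, (pvLt2_iff s a).1 h⟩⟩

-- suffix-tier disjointness (".safetensors.index.json" files do not end with ".safetensors", etc.)
theorem pvSufCompare (s p q : String)
    (hp : PySem.Str.endswith s p = true) (hq : PySem.Str.endswith s q = true) :
    p.toList <:+ q.toList ∨ q.toList <:+ p.toList :=
  List.suffix_or_suffix_of_suffix (List.isSuffixOf_iff_suffix.1 hp) (List.isSuffixOf_iff_suffix.1 hq)

theorem pvD01 (s : String) (h : PySem.Str.endswith s ".safetensors.index.json" = true) :
    PySem.Str.endswith s ".safetensors" = false := by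
  by_contra hb
  have hb' : PySem.Str.endswith s ".safetensors" = true := by simpa using hb
  have := pvSufCompare s _ _ h hb'
  revert this
  decide

theorem pvD02 (s : String) (h : PySem.Str.endswith s ".safetensors.index.json" = true) :
    PySem.Str.endswith s ".gguf" = false := by
  by_contra hb
  have hb' : PySem.Str.endswith s ".gguf" = true := by simpa using hb
  have := pvSufCompare s _ _ h hb'
  revert this
  decide

theorem pvD12 (s : String) (h : PySem.Str.endswith s ".safetensors" = true) :
    PySem.Str.endswith s ".gguf" = false := by
  by_contra hb
  have hb' : PySem.Str.endswith s ".gguf" = true := by simpa using hb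
  have := pvSufCompare s _ _ h hb'
  revert this
  decide

-- B's fold returns `a` once `a`'s key is a lower bound of all candidate keys
theorem pvB_eq (l : List String) (a : String) (ka : Int × Int × Int × String)
    (hka : pvKey? a = some ka) (hmem : a ∈ l)
    (hmin : ∀ s ∈ l, ∀ k, pvKey? s = some k → pvKeyLt k ka = false) :
    ((l.filterMap pvKey?).foldl (pvPick pvKeyLt) none).map (fun k => k.2.2.2) = some a := by
  have hk4 : ka.2.2.2 = a := by
    unfold pvKey? at hka
    split_ifs at hka <;> (cases hka; rfl)
  have hmem' : ka ∈ l.filterMap pvKey? := List.mem_filterMap.2 ⟨a, hmem, hka⟩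
  have hmin' : ∀ y ∈ l.filterMap pvKey?, pvKeyLt y ka = false := by
    intro y hy
    obtain ⟨s, hs, hks⟩ := List.mem_filterMap.1 hy
    exact hmin s hs y hks
  rw [pvPick_fold_eq_of_min pvKeyLt pvKeyLt_trans pvKeyLt_irr pvKeyLt_conn _ ka hmem' hmin']
  simp [hk4]

-- tier disjointness in usable direction
theorem pvE1_not_e0 (s : String) (h : PySem.Str.endswith s ".safetensors" = true) :
    PySem.Str.endswith s ".safetensors.index.json" = false := by
  cases hc : PySem.Str.endswith s ".safetensors.index.json"
  · rfl
  · have := pvD01 s hc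
    rw [h] at this
    cases this

theorem pvE2_not_e0 (s : String) (h : PySem.Str.endswith s ".gguf" = true) :
    PySem.Str.endswith s ".safetensors.index.json" = false := by
  cases hc : PySem.Str.endswith s ".safetensors.index.json"
  · rfl
  · have := pvD02 s hc
    rw [h] at this
    cases this

theorem pvE2_not_e1 (s : String) (h : PySem.Str.endswith s ".gguf" = true) :
    PySem.Str.endswith s ".safetensors" = false := by
  cases hc : PySem.Str.endswith s ".safetensors"
  · rfl
  · have := pvD12 s hc
    rw [h] at this
    cases this

-- ===== VERDICT (by name: the statement is the Claim_ definition above) =====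
theorem pick_weights_file_spec : Claim_equal_pick_weights_file := by
  intro l _hdom
  show pick_weights_file l = pick_weights_file_alt l
  rw [pvAlt_eq_keys_fold]
  by_cases hL : l = []
  · subst hL
    simp [pick_weights_file]
  by_cases hc0 : ((l.filter (fun s => PySem.Str.endswith s ".safetensors.index.json")).contains "model.safetensors.index.json" = true)
  · -- A1: the preferred index file is present
    simp only [pick_weights_file, if_neg hL, hc0, if_true]
    refine (pvB_eq l "model.safetensors.index.json"
      (0, 0, PySem.Str.len "model.safetensors.index.json", "model.safetensors.index.json") ?_ ?_ ?_).symm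
    · decide
    · exact (List.mem_filter.1 (List.mem_of_elem_eq_true hc0)).1
    · intro s hs k hk
      unfold pvKey? at hk
      split_ifs at hk with g0 g1 g2 g3 g4 g5 <;> cases hk
      · rw [g1]
        exact pvKeyLt_irr _
      · apply pvKeyLt_eq_false
        rintro (c | ⟨-, c | ⟨e, -⟩⟩) <;> simp_all
      · apply pvKeyLt_eq_false
        rintro (c | ⟨e, -⟩) <;> omega
      · apply pvKeyLt_eq_false
        rintro (c | ⟨e, -⟩) <;> omega
      · apply pvKeyLt_eq_false
        rintro (c | ⟨e, -⟩) <;> omega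
      · apply pvKeyLt_eq_false
        rintro (c | ⟨e, -⟩) <;> omega
  by_cases hne0 : (l.filter (fun s => PySem.Str.endswith s ".safetensors.index.json")) = []
  case neg =>
    -- A2: some index file, but not the preferred name
    simp only [pick_weights_file, if_neg hL, hc0, if_false, Bool.not_eq_true, ne_eq, hne0,
      not_false_eq_true, if_true, Bool.false_eq_true]
    rw [pvSorted2_pyGet0]
    show List.foldl (pvPick pvLt2) none (l.filter (fun s => PySem.Str.endswith s ".safetensors.index.json")) = _
    cases hf : List.foldl (pvPick pvLt2) none (l.filter (fun s => PySem.Str.endswith s ".safetensors.index.json")) with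
    | none =>
      rw [pvPick_fold_eq_none] at hf
      exact absurd hf.2 hne0
    | some a =>
      obtain ⟨hamem, hamin⟩ := pvPick_fold_min pvLt2 pvLt2_trans pvLt2_irr pvLt2_conn _ a hf
      have hal : a ∈ l := (List.mem_filter.1 hamem).1
      have hae : PySem.Str.endswith a ".safetensors.index.json" = true := by
        simpa using (List.mem_filter.1 hamem).2
      have haT : a ≠ "model.safetensors.index.json" := by
        intro he
        subst he
        exact hc0 (List.elem_eq_true_of_mem hamem)
      refine (pvB_eq l a (0, 1, PySem.Str.len a, a) ?_ hal ?_).symm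
      · unfold pvKey?
        rw [hae, if_pos rfl, if_neg haT]
      · intro s hs k hk
        unfold pvKey? at hk
        split_ifs at hk with g0 g1 g2 g3 g4 g5 <;> cases hk
        · exfalso
          have hst : s ∈ l.filter (fun s => PySem.Str.endswith s ".safetensors.index.json") :=
            List.mem_filter.2 ⟨hs, by simpa using g0⟩
          rw [g1] at hst
          exact hc0 (List.elem_eq_true_of_mem hst)
        · have hst : s ∈ l.filter (fun s => PySem.Str.endswith s ".safetensors.index.json") :=
            List.mem_filter.2 ⟨hs, by simpa using g0⟩
          rw [pvKeyLt_same]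
          exact hamin s hst
        · apply pvKeyLt_eq_false
          rintro (c | ⟨e, -⟩) <;> omega
        · apply pvKeyLt_eq_false
          rintro (c | ⟨e, -⟩) <;> omega
        · apply pvKeyLt_eq_false
          rintro (c | ⟨e, -⟩) <;> omega
        · apply pvKeyLt_eq_false
          rintro (c | ⟨e, -⟩) <;> omega
  case pos =>
    -- no index files at all
    have hT0 (s : String) (hs : s ∈ l) : ¬ (PySem.Str.endswith s ".safetensors.index.json" = true) := by
      intro g
      have : s ∈ l.filter (fun s => PySem.Str.endswith s ".safetensors.index.json") :=
        List.mem_filter.2 ⟨hs, by simpa using g⟩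
      rw [hne0] at this
      cases this
    by_cases hc1 : ((l.filter (fun s => PySem.Str.endswith s ".safetensors")).contains "model.safetensors" = true)
    · -- A3: the preferred plain weights file is present
      simp only [pick_weights_file, if_neg hL, hc0, if_false, Bool.not_eq_true, ne_eq, hne0,
        not_true_eq_false, if_false, hc1, if_true, Bool.false_eq_true]
      refine (pvB_eq l "model.safetensors"
        (1, 0, PySem.Str.len "model.safetensors", "model.safetensors") ?_ ?_ ?_).symm
      · decide
      · exact (List.mem_filter.1 (List.mem_of_elem_eq_true hc1)).1
      · intro s hs k hk
        unfold pvKey? at hk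
        split_ifs at hk with g0 g1 g2 g3 g4 g5 <;> cases hk
        · exact absurd g0 (hT0 s hs)
        · exact absurd g0 (hT0 s hs)
        · rw [g3]
          exact pvKeyLt_irr _
        · apply pvKeyLt_eq_false
          rintro (c | ⟨-, c | ⟨e, -⟩⟩) <;> simp_all
        · apply pvKeyLt_eq_false
          rintro (c | ⟨e, -⟩) <;> omega
        · apply pvKeyLt_eq_false
          rintro (c | ⟨e, -⟩) <;> omega
    by_cases hne1 : (l.filter (fun s => PySem.Str.endswith s ".safetensors")) = []
    case neg =>
      -- A4: some plain weights file, not the preferred name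
      simp only [pick_weights_file, if_neg hL, hc0, hc1, if_false, Bool.not_eq_true, ne_eq, hne0,
        not_true_eq_false, hne1, not_false_eq_true, if_true, Bool.false_eq_true]
      rw [pvSorted2_pyGet0]
      show List.foldl (pvPick pvLt2) none (l.filter (fun s => PySem.Str.endswith s ".safetensors")) = _
      cases hf : List.foldl (pvPick pvLt2) none (l.filter (fun s => PySem.Str.endswith s ".safetensors")) with
      | none =>
        rw [pvPick_fold_eq_none] at hf
        exact absurd hf.2 hne1
      | some a =>
        obtain ⟨hamem, hamin⟩ := pvPick_fold_min pvLt2 pvLt2_trans pvLt2_irr pvLt2_conn _ a hf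
        have hal : a ∈ l := (List.mem_filter.1 hamem).1
        have hae : PySem.Str.endswith a ".safetensors" = true := by
          simpa using (List.mem_filter.1 hamem).2
        have haT : a ≠ "model.safetensors" := by
          intro he
          subst he
          exact hc1 (List.elem_eq_true_of_mem hamem)
        refine (pvB_eq l a (1, 1, PySem.Str.len a, a) ?_ hal ?_).symm
        · unfold pvKey?
          rw [pvE1_not_e0 a hae, if_neg Bool.false_ne_true, hae, if_pos rfl, if_neg haT]
        · intro s hs k hk
          unfold pvKey? at hk
          split_ifs at hk with g0 g1 g2 g3 g4 g5 <;> cases hk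
          · exact absurd g0 (hT0 s hs)
          · exact absurd g0 (hT0 s hs)
          · exfalso
            have hst : s ∈ l.filter (fun s => PySem.Str.endswith s ".safetensors") :=
              List.mem_filter.2 ⟨hs, by simpa using g2⟩
            rw [g3] at hst
            exact hc1 (List.elem_eq_true_of_mem hst)
          · have hst : s ∈ l.filter (fun s => PySem.Str.endswith s ".safetensors") :=
              List.mem_filter.2 ⟨hs, by simpa using g2⟩
            rw [pvKeyLt_same]
            exact hamin s hst
          · apply pvKeyLt_eq_false
            rintro (c | ⟨e, -⟩) <;> omega
          · apply pvKeyLt_eq_false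
            rintro (c | ⟨e, -⟩) <;> omega
    case pos =>
      -- no index or plain weights files
      have hT1 (s : String) (hs : s ∈ l) : ¬ (PySem.Str.endswith s ".safetensors" = true) := by
        intro g
        have : s ∈ l.filter (fun s => PySem.Str.endswith s ".safetensors") :=
          List.mem_filter.2 ⟨hs, by simpa using g⟩
        rw [hne1] at this
        cases this
      by_cases hne2 : (l.filter (fun s => PySem.Str.endswith s ".gguf")) = []
      case pos =>
        -- A7: nothing matches
        simp only [pick_weights_file, if_neg hL, hc0, hc1, if_false, Bool.not_eq_true, ne_eq, hne0,
          not_true_eq_false, hne1, hne2, Bool.false_eq_true]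
        have hkeys : l.filterMap pvKey? = [] := by
          rw [List.filterMap_eq_nil_iff]
          intro s hs
          have hT2 : ¬ (PySem.Str.endswith s ".gguf" = true) := by
            intro g
            have : s ∈ l.filter (fun s => PySem.Str.endswith s ".gguf") :=
              List.mem_filter.2 ⟨hs, by simpa using g⟩
            rw [hne2] at this
            cases this
          unfold pvKey?
          rw [if_neg (hT0 s hs), if_neg (hT1 s hs), if_neg hT2]
        rw [hkeys]
        simp
      case neg =>
        by_cases hpf : ((l.filter (fun s => PySem.Str.endswith s ".gguf")).filter
            (fun s => PySem.Str.isIn "q4_k_m" (PySem.Str.lower s))) = []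
        case neg =>
          -- A5: a q4_k_m gguf exists
          simp only [pick_weights_file, if_neg hL, hc0, hc1, if_false, Bool.not_eq_true, ne_eq, hne0,
            not_true_eq_false, hne1, hne2, not_false_eq_true, if_true, hpf, Bool.false_eq_true]
          rw [pvSorted2_pyGet0]
          show List.foldl (pvPick pvLt2) none ((l.filter (fun s => PySem.Str.endswith s ".gguf")).filter
            (fun s => PySem.Str.isIn "q4_k_m" (PySem.Str.lower s))) = _
          cases hf : List.foldl (pvPick pvLt2) none ((l.filter (fun s => PySem.Str.endswith s ".gguf")).filter
            (fun s => PySem.Str.isIn "q4_k_m" (PySem.Str.lower s))) with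
          | none =>
            rw [pvPick_fold_eq_none] at hf
            exact absurd hf.2 hpf
          | some a =>
            obtain ⟨hamem, hamin⟩ := pvPick_fold_min pvLt2 pvLt2_trans pvLt2_irr pvLt2_conn _ a hf
            have hag : a ∈ l.filter (fun s => PySem.Str.endswith s ".gguf") := (List.mem_filter.1 hamem).1
            have haq : PySem.Str.isIn "q4_k_m" (PySem.Str.lower a) = true := by
              simpa using (List.mem_filter.1 hamem).2
            have hal : a ∈ l := (List.mem_filter.1 hag).1
            have hae : PySem.Str.endswith a ".gguf" = true := by
              simpa using (List.mem_filter.1 hag).2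
            refine (pvB_eq l a (2, 0, PySem.Str.len a, a) ?_ hal ?_).symm
            · unfold pvKey?
              rw [pvE2_not_e0 a hae, if_neg Bool.false_ne_true, pvE2_not_e1 a hae,
                if_neg Bool.false_ne_true, hae, if_pos rfl, haq, if_pos rfl]
            · intro s hs k hk
              unfold pvKey? at hk
              split_ifs at hk with g0 g1 g2 g3 g4 g5 <;> cases hk
              · exact absurd g0 (hT0 s hs)
              · exact absurd g0 (hT0 s hs)
              · exact absurd g2 (hT1 s hs)
              · exact absurd g2 (hT1 s hs)
              · have hsg : s ∈ l.filter (fun s => PySem.Str.endswith s ".gguf") :=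
                  List.mem_filter.2 ⟨hs, by simpa using g4⟩
                have hsp : s ∈ (l.filter (fun s => PySem.Str.endswith s ".gguf")).filter
                    (fun s => PySem.Str.isIn "q4_k_m" (PySem.Str.lower s)) :=
                  List.mem_filter.2 ⟨hsg, by simpa using g5⟩
                rw [pvKeyLt_same]
                exact hamin s hsp
              · apply pvKeyLt_eq_false
                rintro (c | ⟨-, c | ⟨e, -⟩⟩) <;> simp_all
        case pos =>
          -- A6: gguf files only, none preferred
          simp only [pick_weights_file, if_neg hL, hc0, hc1, if_false, Bool.not_eq_true, ne_eq, hne0,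
            not_true_eq_false, hne1, hne2, not_false_eq_true, if_true, hpf, Bool.false_eq_true]
          rw [pvSorted2_pyGet0]
          show List.foldl (pvPick pvLt2) none (l.filter (fun s => PySem.Str.endswith s ".gguf")) = _
          cases hf : List.foldl (pvPick pvLt2) none (l.filter (fun s => PySem.Str.endswith s ".gguf")) with
          | none =>
            rw [pvPick_fold_eq_none] at hf
            exact absurd hf.2 hne2
          | some a =>
            obtain ⟨hamem, hamin⟩ := pvPick_fold_min pvLt2 pvLt2_trans pvLt2_irr pvLt2_conn _ a hf
            have hal : a ∈ l := (List.mem_filter.1 hamem).1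
            have hae : PySem.Str.endswith a ".gguf" = true := by
              simpa using (List.mem_filter.1 hamem).2
            have hqf (s : String) (hsg : s ∈ l.filter (fun s => PySem.Str.endswith s ".gguf")) :
                ¬ (PySem.Str.isIn "q4_k_m" (PySem.Str.lower s) = true) := by
              intro hq
              have : s ∈ (l.filter (fun s => PySem.Str.endswith s ".gguf")).filter
                  (fun s => PySem.Str.isIn "q4_k_m" (PySem.Str.lower s)) :=
                List.mem_filter.2 ⟨hsg, by simpa using hq⟩
              rw [hpf] at this
              cases this
            refine (pvB_eq l a (2, 1, PySem.Str.len a, a) ?_ hal ?_).symm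
            · unfold pvKey?
              rw [pvE2_not_e0 a hae, if_neg Bool.false_ne_true, pvE2_not_e1 a hae,
                if_neg Bool.false_ne_true, hae, if_pos rfl, if_neg (hqf a hamem)]
            · intro s hs k hk
              unfold pvKey? at hk
              split_ifs at hk with g0 g1 g2 g3 g4 g5 <;> cases hk
              · exact absurd g0 (hT0 s hs)
              · exact absurd g0 (hT0 s hs)
              · exact absurd g2 (hT1 s hs)
              · exact absurd g2 (hT1 s hs)
              · have hsg : s ∈ l.filter (fun s => PySem.Str.endswith s ".gguf") :=
                  List.mem_filter.2 ⟨hs, by simpa using g4⟩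
                exact absurd g5 (hqf s hsg)
              · have hsg : s ∈ l.filter (fun s => PySem.Str.endswith s ".gguf") :=
                  List.mem_filter.2 ⟨hs, by simpa using g4⟩
                rw [pvKeyLt_same]
                exact hamin s hsg
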